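-- pv_equiv track=rewrite | github.com/MohammadrezaAmani/TEXIT | texit/totexit.py | convert_to_texit
-- ===== SOURCE A (Python) =====
-- def convert_to_texit(parsed_latex):
--     texit_commands = []
--     current_command = None
--     current_args = []
--
--     for token_type, token_value in parsed_latex:
--         if token_type == 'command':
--             if current_command is not None:
--                 if current_args:
--                     texit_commands.append((current_command, tuple(current_args)))
--                 else:
--                     texit_commands.append((current_command, ()))
--             current_command = token_value
--             current_args = []
--         elif token_type in ['braces', 'square_brackets']:
--             current_args.append(token_value)
--         elif token_type == 'text':
--             current_args.append(token_value)
--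
--     if current_command is not None:
--         if current_args:
--             texit_commands.append((current_command, tuple(current_args)))
--         else:
--             texit_commands.append((current_command, ()))
--
--     return texit_commands
-- ===== SOURCE B (Python) =====
-- def convert_to_texit(parsed_latex):
--     # Segment-based rewrite: skip tokens before the first command, then repeatedly
--     # split off the run of non-command tokens after each command (one flush path).
--     toks = list(parsed_latex)
--     res = []
--     while toks and toks[0][0] != 'command':
--         toks = toks[1:]
--     while toks:
--         cmd = toks[0][1]
--         rest = toks[1:]
--         seg = []
--         while rest and rest[0][0] != 'command':
--             seg.append(rest[0])
--             rest = rest[1:]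
--         res.append((cmd, tuple(v for t, v in seg
--                                if t in ('braces', 'square_brackets', 'text'))))
--         toks = rest
--     return res
-- ===== Notes on version B (the rewrite author's own statement) =====
-- stated objective: alternative
-- what changed: Replaced A's single accumulator loop carrying current_command/current_args with a duplicated end-of-loop flush by a segment decomposition: skip tokens before the first command, then repeatedly span off the run of non-command tokens after each command and emit one pair per segment.
import Mathlib
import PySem

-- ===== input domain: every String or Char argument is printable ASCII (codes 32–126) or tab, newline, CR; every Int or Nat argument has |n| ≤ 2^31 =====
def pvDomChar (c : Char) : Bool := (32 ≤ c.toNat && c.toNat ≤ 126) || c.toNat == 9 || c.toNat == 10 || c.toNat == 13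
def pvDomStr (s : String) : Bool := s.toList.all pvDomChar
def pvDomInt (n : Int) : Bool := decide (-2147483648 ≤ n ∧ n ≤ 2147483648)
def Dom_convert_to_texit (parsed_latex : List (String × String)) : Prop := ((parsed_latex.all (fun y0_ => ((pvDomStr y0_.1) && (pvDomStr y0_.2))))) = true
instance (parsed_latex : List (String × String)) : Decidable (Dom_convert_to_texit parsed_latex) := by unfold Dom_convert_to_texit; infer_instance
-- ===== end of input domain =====

-- B replaces A's single accumulator loop (pending command + pending args, flushed twice)
-- by a segment split: skip to the first command, then repeatedly span off the run of
-- non-command tokens after each command; objective: alternative decomposition.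

-- ===== PORT A =====
-- A's for-loop as structural recursion over the same state
-- (accumulated result, current_command, current_args); final flush at [].
def convert_to_texit_go (l : List (String × String)) (acc : List (String × List String))
    (cur : Option String) (args : List String) : List (String × List String) :=
  match l with
  | [] =>
      match cur with
      | none => acc
      | some c => acc ++ [(c, args)]
  | (t, v) :: rest =>
      if t = "command" then
        convert_to_texit_go rest
          (match cur with | none => acc | some c => acc ++ [(c, args)]) (some v) []
      else if t = "braces" ∨ t = "square_brackets" then
        convert_to_texit_go rest acc cur (args ++ [v])
      else if t = "text" then
        convert_to_texit_go rest acc cur (args ++ [v])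
      else
        convert_to_texit_go rest acc cur args

def convert_to_texit (parsed_latex : List (String × String)) : List (String × List String) :=
  convert_to_texit_go parsed_latex [] none []

-- ===== PORT B =====
-- the outer skip loop: drop tokens before the first command
def pvSkip : List (String × String) → List (String × String)
  | [] => []
  | p :: rest => if p.1 ≠ "command" then pvSkip rest else p :: rest

-- the inner while loop: one pass producing (seg, rest) simultaneously
def pvSpanNC : List (String × String) → List (String × String) × List (String × String)
  | [] => ([], [])
  | p :: rest =>
      if p.1 ≠ "command" then
        let sr := pvSpanNC rest
        (p :: sr.1, sr.2)
      else ([], p :: rest)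

theorem pvSpanNC_snd_length_le (l : List (String × String)) : (pvSpanNC l).2.length ≤ l.length := by
  induction l with
  | nil => simp [pvSpanNC]
  | cons p rest ih =>
      simp only [pvSpanNC]
      split
      · simpa using Nat.le_succ_of_le ih
      · simp

def pvArgsOf (seg : List (String × String)) : List String :=
  seg.filterMap (fun p =>
    if p.1 = "braces" ∨ p.1 = "square_brackets" ∨ p.1 = "text" then some p.2 else none)

def pvAltLoop : List (String × String) → List (String × List String)
  | [] => []
  | (_, v) :: rest =>
      let sr := pvSpanNC rest
      (v, pvArgsOf sr.1) :: pvAltLoop sr.2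
termination_by l => l.length
decreasing_by
  exact Nat.lt_succ_of_le (pvSpanNC_snd_length_le rest)

def convert_to_texit_alt (parsed_latex : List (String × String)) : List (String × List String) :=
  pvAltLoop (pvSkip parsed_latex)

-- ===== PRECONDITION & SPEC =====
def Spec_convert_to_texit (parsed_latex : List (String × String)) (out : List (String × List String)) : Prop := out = convert_to_texit_alt parsed_latex
instance (parsed_latex : List (String × String)) (out : List (String × List String)) : Decidable (Spec_convert_to_texit parsed_latex out) := by unfold Spec_convert_to_texit; infer_instance

-- ===== CLAIM (what is proved, stated in full; the proofs are below) =====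
def Claim_equal_convert_to_texit : Prop := ∀ (parsed_latex : List (String × String)), Dom_convert_to_texit parsed_latex → Spec_convert_to_texit parsed_latex (convert_to_texit parsed_latex)

-- ===== LEMMAS AND PROOFS =====

@[simp] theorem pvAltLoop_nil : pvAltLoop [] = [] := by
  unfold pvAltLoop; rfl

@[simp] theorem pvAltLoop_cons (t v : String) (rest : List (String × String)) :
    pvAltLoop ((t, v) :: rest)
      = (v, pvArgsOf (pvSpanNC rest).1) :: pvAltLoop (pvSpanNC rest).2 := by
  rw [pvAltLoop]

-- with a pending command, A's loop collects the non-command run as extra args and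
-- continues at the next command — exactly B's span decomposition
theorem go_some (l : List (String × String)) :
    ∀ (acc : List (String × List String)) (c : String) (args : List String),
      convert_to_texit_go l acc (some c) args
        = acc ++ (c, args ++ pvArgsOf (pvSpanNC l).1) :: pvAltLoop (pvSpanNC l).2 := by
  induction l with
  | nil => intro acc c args; simp [convert_to_texit_go, pvSpanNC, pvArgsOf]
  | cons p rest ih =>
      intro acc c args
      obtain ⟨t, v⟩ := p
      by_cases ht : t = "command"
      · subst ht
        simp only [convert_to_texit_go, ih]
        simp [pvSpanNC, pvArgsOf]
      · have hspan : pvSpanNC ((t, v) :: rest)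
            = ((t, v) :: (pvSpanNC rest).1, (pvSpanNC rest).2) := by
          simp [pvSpanNC, ht]
        by_cases hb : t = "braces" ∨ t = "square_brackets"
        · simp only [convert_to_texit_go, if_neg ht, if_pos hb, ih, hspan]
          have : pvArgsOf ((t, v) :: (pvSpanNC rest).1) = v :: pvArgsOf (pvSpanNC rest).1 := by
            rcases hb with hb | hb <;> simp [pvArgsOf, hb]
          simp [this]
        · by_cases htx : t = "text"
          · simp only [convert_to_texit_go, if_neg ht, if_neg hb, if_pos htx, ih, hspan]
            simp [pvArgsOf, htx]
          · simp only [convert_to_texit_go, if_neg ht, if_neg hb, if_neg htx, ih, hspan]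
            have : pvArgsOf ((t, v) :: (pvSpanNC rest).1) = pvArgsOf (pvSpanNC rest).1 := by
              rw [not_or] at hb
              simp [pvArgsOf, hb.1, hb.2, htx]
            simp [this]

-- before the first command A only discards tokens (any stray args are dropped at the flush)
theorem go_none (l : List (String × String)) :
    ∀ (acc : List (String × List String)) (args : List String),
      convert_to_texit_go l acc none args = acc ++ pvAltLoop (pvSkip l) := by
  induction l with
  | nil => intro acc args; simp [convert_to_texit_go, pvSkip]
  | cons p rest ih =>
      intro acc args
      obtain ⟨t, v⟩ := p
      by_cases ht : t = "command"
      · subst ht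
        simp only [convert_to_texit_go, go_some]
        simp [pvSkip]
      · have hskip : pvSkip ((t, v) :: rest) = pvSkip rest := by simp [pvSkip, ht]
        by_cases hb : t = "braces" ∨ t = "square_brackets"
        · simp only [convert_to_texit_go, if_neg ht, if_pos hb, ih, hskip]
        · by_cases htx : t = "text"
          · simp only [convert_to_texit_go, if_neg ht, if_neg hb, if_pos htx, ih, hskip]
          · simp only [convert_to_texit_go, if_neg ht, if_neg hb, if_neg htx, ih, hskip]

-- ===== VERDICT (by name: the statement is the Claim_ definition above) =====
theorem convert_to_texit_spec : Claim_equal_convert_to_texit := by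
  intro pl _
  show convert_to_texit pl = convert_to_texit_alt pl
  simp [convert_to_texit, convert_to_texit_alt, go_none]
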